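-- pv_equiv track=rewrite | github.com/robertvoy/ComfyUI-Distributed | nodes/utilities.py | _chunk_bounds
-- ===== SOURCE A (Python) =====
-- def _chunk_bounds(total_items: int, n_splits: int) -> list[tuple[int, int]]:
--     """Return contiguous [start, end) bounds for n_splits chunks."""
--     split_count = max(1, int(n_splits))
--     total = max(0, int(total_items))
--     base, remainder = divmod(total, split_count)
--
--     bounds: list[tuple[int, int]] = []
--     start = 0
--     for idx in range(split_count):
--         size = base + (1 if idx < remainder else 0)
--         end = start + size
--         bounds.append((start, end))
--         start = end
--     return bounds
-- ===== SOURCE B (Python) =====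
-- def _chunk_bounds(total_items: int, n_splits: int) -> list[tuple[int, int]]:
--     """Return contiguous [start, end) bounds for n_splits chunks."""
--     split_count = max(1, int(n_splits))
--     total = max(0, int(total_items))
--     base, remainder = divmod(total, split_count)
--     return [(idx * base + min(idx, remainder),
--              (idx + 1) * base + min(idx + 1, remainder))
--             for idx in range(split_count)]
-- ===== Notes on version B (the rewrite author's own statement) =====
-- stated objective: alternative
-- what changed: Replaces the accumulator loop (running start carried across iterations) with a closed form: each chunk's bounds are computed independently from its index as idx*base + min(idx, remainder).
import Mathlib
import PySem

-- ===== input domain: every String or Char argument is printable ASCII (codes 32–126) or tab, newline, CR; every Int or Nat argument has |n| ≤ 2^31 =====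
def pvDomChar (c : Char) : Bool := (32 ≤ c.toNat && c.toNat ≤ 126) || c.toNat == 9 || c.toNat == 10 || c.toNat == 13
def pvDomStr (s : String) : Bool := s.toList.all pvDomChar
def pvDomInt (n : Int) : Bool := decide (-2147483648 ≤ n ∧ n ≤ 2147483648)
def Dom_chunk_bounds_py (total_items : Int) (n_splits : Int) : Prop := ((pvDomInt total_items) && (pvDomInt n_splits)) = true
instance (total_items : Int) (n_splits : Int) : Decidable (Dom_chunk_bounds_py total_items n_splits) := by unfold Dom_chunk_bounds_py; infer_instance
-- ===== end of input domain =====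

-- B replaces A's running-start accumulator loop with a per-index closed form (alternative decomposition, same cost).

-- ===== PORT A =====
def chunk_bounds_py (total_items : Int) (n_splits : Int) : List (Int × Int) :=
  let split_count := max 1 n_splits
  let total := max 0 total_items
  let base := PySem.Int.floordiv total split_count
  let remainder := PySem.Int.mod total split_count
  let r := (PySem.List.pyRange 0 split_count 1).foldl
    (fun (st : List (Int × Int) × Int) idx =>
      let size := base + (if idx < remainder then 1 else 0)
      let e := st.2 + size
      (st.1 ++ [(st.2, e)], e)) (([] : List (Int × Int)), 0)
  r.1

-- ===== PORT B =====
def chunk_bounds_py_alt (total_items : Int) (n_splits : Int) : List (Int × Int) :=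
  let split_count := max 1 n_splits
  let total := max 0 total_items
  let base := PySem.Int.floordiv total split_count
  let remainder := PySem.Int.mod total split_count
  (PySem.List.pyRange 0 split_count 1).map
    (fun idx => (idx * base + min idx remainder, (idx + 1) * base + min (idx + 1) remainder))

-- ===== PRECONDITION & SPEC =====
def Spec_chunk_bounds_py (total_items : Int) (n_splits : Int) (out : List (Int × Int)) : Prop := out = chunk_bounds_py_alt total_items n_splits
instance (total_items : Int) (n_splits : Int) (out : List (Int × Int)) : Decidable (Spec_chunk_bounds_py total_items n_splits out) := by unfold Spec_chunk_bounds_py; infer_instance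

-- ===== CLAIM (what is proved, stated in full; the proofs are below) =====
def Claim_equal_chunk_bounds_py : Prop := ∀ (total_items : Int) (n_splits : Int), Dom_chunk_bounds_py total_items n_splits → Spec_chunk_bounds_py total_items n_splits (chunk_bounds_py total_items n_splits)

-- ===== LEMMAS AND PROOFS =====

-- Invariant: A's running start at index a equals B's closed form a*base + min a rem.
lemma chunk_foldl_closed (base rem n : Int) :
    ∀ (k : Nat) (a : Int) (acc : List (Int × Int)), (n - a).toNat = k →
    ((PySem.List.pyRange a n 1).foldl
      (fun (st : List (Int × Int) × Int) idx =>
        let size := base + (if idx < rem then 1 else 0)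
        let e := st.2 + size
        (st.1 ++ [(st.2, e)], e)) (acc, a * base + min a rem)).1
    = acc ++ (PySem.List.pyRange a n 1).map
        (fun idx => (idx * base + min idx rem, (idx + 1) * base + min (idx + 1) rem)) := by
  intro k
  induction k with
  | zero =>
    intro a acc h
    rw [PySem.List.pyRange_one_eq_nil (by omega)]
    simp
  | succ k ih =>
    intro a acc h
    rw [PySem.List.pyRange_one_cons (by omega)]
    simp only [List.foldl_cons, List.map_cons]
    have hmin : min a rem + (if a < rem then 1 else 0) = min (a + 1) rem := by
      split_ifs with h' <;> omega
    have hstep : a * base + min a rem + (base + (if a < rem then 1 else 0))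
        = (a + 1) * base + min (a + 1) rem := by linear_combination hmin
    simp only [hstep]
    rw [ih (a + 1) (acc ++ [(a * base + min a rem, (a + 1) * base + min (a + 1) rem)]) (by omega)]
    simp

-- ===== VERDICT (by name: the statement is the Claim_ definition above) =====
theorem chunk_bounds_py_spec : Claim_equal_chunk_bounds_py := by
  intro total_items n_splits _
  unfold Spec_chunk_bounds_py chunk_bounds_py chunk_bounds_py_alt
  have hpos : (0 : Int) < max 1 n_splits := by omega
  have hrem : 0 ≤ PySem.Int.mod (max 0 total_items) (max 1 n_splits) :=
    PySem.Int.mod_nonneg _ (by omega)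
  have h0 : (0 : Int) = 0 * (PySem.Int.floordiv (max 0 total_items) (max 1 n_splits))
      + min 0 (PySem.Int.mod (max 0 total_items) (max 1 n_splits)) := by
    rw [min_eq_left hrem]; ring
  simp only []
  rw [show (([] : List (Int × Int)), (0:Int)) = (([] : List (Int × Int)),
      0 * (PySem.Int.floordiv (max 0 total_items) (max 1 n_splits))
      + min 0 (PySem.Int.mod (max 0 total_items) (max 1 n_splits))) by rw [← h0]]
  rw [chunk_foldl_closed _ _ _ (max 1 n_splits - 0).toNat 0 [] rfl]
  simp
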